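-- pv_equiv track=rewrite | github.com/loudsheep/matura | informatyka/przykładowy_2023/zad1/zad1_3.py | seeing_pairs
-- ===== SOURCE A (Python) =====
-- def seeing_pairs(line):
--     res = []
--     current = ""
--     for i in line:
--         if i == ".":
--             if current == "":
--                 continue
--             current += "."
--         else:
--             if current == "":
--                 current = i
--             else:
--                 current += i
--                 res.append(current)
--                 current = i
--     return res
-- ===== SOURCE B (Python) =====
-- def seeing_pairs(line):
--     idx = [i for i, c in enumerate(line) if c != "."]
--     return [line[a:b + 1] for a, b in zip(idx, idx[1:])]
-- ===== Notes on version B (the rewrite author's own statement) =====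
-- stated objective: simpler
-- what changed: Replaces the running-accumulator state machine by an index table of non-dot positions plus a pairwise slicing pass over consecutive indices.
import Mathlib
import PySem

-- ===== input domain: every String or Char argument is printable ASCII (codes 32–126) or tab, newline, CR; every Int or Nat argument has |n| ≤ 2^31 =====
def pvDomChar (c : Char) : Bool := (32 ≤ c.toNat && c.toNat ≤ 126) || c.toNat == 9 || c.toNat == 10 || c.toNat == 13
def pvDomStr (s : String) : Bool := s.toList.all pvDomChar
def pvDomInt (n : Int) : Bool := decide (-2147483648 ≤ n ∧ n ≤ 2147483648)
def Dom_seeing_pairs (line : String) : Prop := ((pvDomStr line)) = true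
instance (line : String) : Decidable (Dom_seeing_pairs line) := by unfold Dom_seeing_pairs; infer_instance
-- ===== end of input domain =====

-- B replaces A's running-accumulator state machine by an index table of the
-- non-dot positions plus a pairwise slicing pass (objective: simpler).

-- ===== PORT A =====
-- The loop state is (res, current); Python strings are represented as their
-- lists of characters and turned back into String at the end.
def pvStepA (st : List (List Char) × List Char) (i : Char) : List (List Char) × List Char :=
  if i = '.' then
    if st.2 = [] then st
    else (st.1, st.2 ++ ['.'])
  else
    if st.2 = [] then (st.1, [i])
    else (st.1 ++ [st.2 ++ [i]], [i])

def seeing_pairs (line : String) : List String :=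
  ((line.toList.foldl pvStepA ([], [])).1).map String.ofList

-- ===== PORT B =====
def seeing_pairs_alt (line : String) : List String :=
  let cs := line.toList
  let idx := ((PySem.List.enumerate cs).filter (fun p => p.2 ≠ '.')).map (fun p => p.1)
  (idx.zip idx.tail).map (fun q => String.ofList (PySem.List.slice cs (some q.1) (some (q.2 + 1))))

-- ===== PRECONDITION & SPEC =====
def Spec_seeing_pairs (line : String) (out : List String) : Prop := out = seeing_pairs_alt line
instance (line : String) (out : List String) : Decidable (Spec_seeing_pairs line out) := by unfold Spec_seeing_pairs; infer_instance

-- ===== CLAIM (what is proved, stated in full; the proofs are below) =====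
def Claim_equal_seeing_pairs : Prop := ∀ (line : String), Dom_seeing_pairs line → Spec_seeing_pairs line (seeing_pairs line)

-- ===== LEMMAS AND PROOFS =====

-- the non-dot index table of B, as a function of the character list
def pvIdx (cs : List Char) : List Int :=
  ((PySem.List.enumerate cs).filter (fun p => p.2 ≠ '.')).map (fun p => p.1)

-- consecutive pairs of a list (equals l.zip l.tail; recursive form for induction)
def pvCpairs : List Int → List (Int × Int)
  | a :: b :: t => (a, b) :: pvCpairs (b :: t)
  | _ => []

-- the characters from position a to position b inclusive
def pvSeg (cs : List Char) (a b : Int) : List Char :=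
  (cs.drop a.toNat).take ((b + 1).toNat - a.toNat)

-- A's `current` after processing cs: the suffix from the last non-dot position
def pvCur (cs : List Char) : List Char :=
  match (pvIdx cs).getLast? with
  | none => []
  | some a => cs.drop a.toNat

lemma pvCpairs_eq_zip (l : List Int) : pvCpairs l = l.zip l.tail := by
  induction l with
  | nil => rfl
  | cons a t ih =>
    cases t with
    | nil => rfl
    | cons b t' => simp [pvCpairs, ih]

lemma pvCpairs_append (l : List Int) (n : Int) (h : l ≠ []) :
    pvCpairs (l ++ [n]) = pvCpairs l ++ [(l.getLast h, n)] := by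
  induction l with
  | nil => simp at h
  | cons a t ih =>
    cases t with
    | nil => rfl
    | cons b t' =>
      have h2 : (b :: t') ≠ [] := by simp
      rw [show pvCpairs ((a :: b :: t') ++ [n]) = (a, b) :: pvCpairs ((b :: t') ++ [n]) from rfl,
        ih h2]
      simp [pvCpairs, List.getLast_cons]

lemma pvCpairs_mem {l : List Int} {q : Int × Int} (h : q ∈ pvCpairs l) :
    q.1 ∈ l ∧ q.2 ∈ l := by
  induction l with
  | nil => simp [pvCpairs] at h
  | cons a t ih =>
    cases t with
    | nil => simp [pvCpairs] at h
    | cons b t' =>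
      simp only [pvCpairs, List.mem_cons] at h
      rcases h with h | h
      · subst h; simp
      · have := ih h; exact ⟨List.mem_cons_of_mem _ this.1, List.mem_cons_of_mem _ this.2⟩

lemma pvIdx_append (cs : List Char) (c : Char) :
    pvIdx (cs ++ [c]) = pvIdx cs ++ (if c = '.' then [] else [(cs.length : Int)]) := by
  unfold pvIdx
  rw [PySem.List.enumerate_append, List.filter_append, List.map_append]
  by_cases hc : c = '.' <;> simp [PySem.List.enumerate, hc]

lemma pvIdx_mem {cs : List Char} {a : Int} (h : a ∈ pvIdx cs) :
    0 ≤ a ∧ a < cs.length := by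
  unfold pvIdx at h
  simp only [List.mem_map, List.mem_filter] at h
  obtain ⟨p, ⟨hp, _⟩, rfl⟩ := h
  rw [PySem.List.mem_enumerate_iff] at hp
  obtain ⟨k, hk, rfl⟩ := hp
  constructor <;> simp <;> omega

-- segments determined by in-range indices are unchanged by appending a character
lemma pvSeg_append {cs : List Char} {a b : Int} (c : Char)
    (ha : 0 ≤ a) (ha' : a < cs.length) (hb : b < cs.length) :
    pvSeg (cs ++ [c]) a b = pvSeg cs a b := by
  unfold pvSeg
  rw [List.drop_append_of_le_length (by omega), List.take_append_of_le_length]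
  simp only [List.length_drop]
  omega

-- the mapped pair lists over a prefix and its extension agree
lemma pvMap_seg_append (p : List Char) (c : Char) :
    (pvCpairs (pvIdx p)).map (fun q => pvSeg (p ++ [c]) q.1 q.2)
      = (pvCpairs (pvIdx p)).map (fun q => pvSeg p q.1 q.2) := by
  apply List.map_congr_left
  intro q hq
  have hm := pvCpairs_mem hq
  have h1 := pvIdx_mem hm.1
  have h2 := pvIdx_mem hm.2
  exact pvSeg_append c h1.1 h1.2 h2.2

-- the loop invariant: A's fold over cs yields B's pair list over cs and pvCur cs
lemma pvFold_inv (cs : List Char) :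
    cs.foldl pvStepA ([], []) =
      ((pvCpairs (pvIdx cs)).map (fun q => pvSeg cs q.1 q.2), pvCur cs) := by
  induction cs using List.reverseRecOn with
  | nil => rfl
  | append_singleton p c ih =>
    rw [List.foldl_append, ih, List.foldl_cons, List.foldl_nil]
    cases hl : (pvIdx p).getLast? with
    | none =>
      have hnil : pvIdx p = [] := List.getLast?_eq_none_iff.mp hl
      have hcur : pvCur p = [] := by unfold pvCur; rw [hl]
      by_cases hc : c = '.'
      · subst hc
        simp [pvStepA, hcur, pvIdx_append, pvCur, hnil]
        intro a b h
        simp [pvCpairs] at h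
      · simp [pvStepA, hcur, hc, pvIdx_append, pvCur, hnil, pvCpairs,
          Int.toNat_natCast, List.drop_append_of_le_length (le_refl p.length)]
    | some a =>
      have hne : pvIdx p ≠ [] := by
        intro h; rw [h] at hl; simp at hl
      have hmem : a ∈ pvIdx p := List.mem_of_getLast? hl
      have hb := pvIdx_mem hmem
      have hcur : pvCur p = p.drop a.toNat := by unfold pvCur; rw [hl]
      have hcurne : pvCur p ≠ [] := by
        rw [hcur]
        intro h
        have := List.drop_eq_nil_iff.mp h
        omega
      by_cases hc : c = '.'
      · subst hc
        simp only [pvStepA, if_true, reduceIte, if_neg hcurne, pvIdx_append,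
          List.append_nil, pvMap_seg_append]
        refine congrArg _ ?_
        unfold pvCur
        rw [pvIdx_append]
        simp only [reduceIte, List.append_nil, hl, hcur]
        rw [List.drop_append_of_le_length (by omega)]
      · have hlast : (pvIdx p).getLast hne = a := by
          have := List.getLast?_eq_some_getLast hne
          rw [hl] at this
          exact (Option.some.injEq _ _ ▸ this).symm
        simp only [pvStepA, if_neg hc, if_neg hcurne]
        rw [pvIdx_append]
        simp only [if_neg hc]
        rw [pvCpairs_append _ _ hne, hlast, List.map_append, pvMap_seg_append]
        refine congrArg₂ _ ?_ ?_
        · congr 1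
          simp only [List.map_cons, List.map_nil]
          congr 1
          rw [hcur]
          unfold pvSeg
          rw [List.drop_append_of_le_length (by omega),
            List.take_of_length_le (by simp; omega)]
        · unfold pvCur
          rw [pvIdx_append]
          simp only [if_neg hc, List.getLast?_concat]
          rw [Int.toNat_natCast, List.drop_append_of_le_length (le_refl _)]
          simp

-- B's slices coincide with pvSeg on the in-range index pairs
lemma pvAlt_eq (line : String) :
    seeing_pairs_alt line =
      ((pvCpairs (pvIdx line.toList)).map (fun q => pvSeg line.toList q.1 q.2)).map String.ofList := by
  unfold seeing_pairs_alt
  simp only [List.map_map]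
  rw [show ((PySem.List.enumerate line.toList).filter (fun p => p.2 ≠ '.')).map (fun p => p.1)
      = pvIdx line.toList from rfl]
  rw [← pvCpairs_eq_zip]
  apply List.map_congr_left
  intro q hq
  have hm := pvCpairs_mem hq
  have h1 := pvIdx_mem hm.1
  have h2 := pvIdx_mem hm.2
  simp only [Function.comp]
  congr 1
  rw [PySem.List.slice_toNat]
  · rfl
  · exact h1.1
  · omega

-- ===== VERDICT (by name: the statement is the Claim_ definition above) =====
theorem seeing_pairs_spec : Claim_equal_seeing_pairs := by
  intro line _
  unfold Spec_seeing_pairs seeing_pairs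
  rw [pvFold_inv, pvAlt_eq]
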